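-- pv_equiv track=rewrite | github.com/sameerSyedNadeem/First-Programming-Project-LOGIC-DOTS | supporting work/thebeauty.py | isTowards
-- ===== SOURCE A (Python) =====
-- def getPositions(board,color):
--     pos=[]
--     for i in range(len(board)):
--         for j in range(len(board[i])):
--             if board[i][j] == color:
--                 pos.append((i,j))
--     return pos
--
-- def sameRow(board, color1, color2,isTrue=True):
--     pos1 = getPositions(board, color1)
--     pos2 = getPositions(board, color2)
--     if isTrue:
--         if pos1 == pos2:
--                 for i in range(len(pos1)):
--                     for j in range(len(pos2)):
--                         if len(pos1)>1 and pos1[i][0]==pos1[j][0]: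
--                             return True
--         else:
--             for i in range(len(pos1)):
--                     for j in range(len(pos2)):
--                         if pos1[i][0]==pos2[j][0]:
--                             return True
--         return False
--     else:
--         return not sameRow(board, color1,color2)
--
-- def sameColumn(board, color1, color2, isTrue=True):
--     pos1 = getPositions(board, color1)
--     pos2 = getPositions(board, color2)
--     if isTrue:
--         if pos1 == pos2:
--             for i in range(len(pos1)):
--                 for j in range(len(pos2)):
--                     if len(pos1) > 1 and pos1[i][1] == pos1[j][1]:
--                         return True
--         else:
--             for i in range(len(pos1)):
--                 for j in range(len(pos2)):
--                     if pos1[i][1] == pos2[j][1]: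
--                         return True
--         return False
--     else:
--         return not sameColumn(board, color1, color2)
--
-- def isTowards(board, color, direction, color2, isTrue=True):
--     pos1=getPositions(board, color)
--     pos2=getPositions(board, color2)
--     if isTrue:
--         if sameColumn(board, color, color2):
--             if direction =='above':
--                 for i in range(len(pos1)):
--                     for j in range(len(pos2)):
--                         if pos1[i][0]<pos2[j][0] and pos1[i][1]==pos2[j][1]:
--                             return True
--                 return False
--             if direction =='under' or direction=='below':
--                 for i in range(len(pos1)):
--                     for j in range(len(pos2)):
--                         if pos1[i][0]>pos2[j][0] and pos1[i][1]==pos2[j][1]: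
--                             return True
--                 return False
--         if sameRow(board, color, color2):
--             if direction =='right':
--                 for i in range(len(pos1)):
--                     for j in range(len(pos2)):
--                         if pos1[i][1]>pos2[j][1] and pos1[i][0]==pos2[j][0]:
--                             return True
--                 return False
--             if direction =='left':
--                 for i in range(len(pos1)):
--                     for j in range(len(pos2)):
--                         if pos1[i][1]<pos2[j][1] and pos1[i][0]==pos2[j][0]:
--                             return True
--                 return False
--         return False
--     else:
--         return not isTowards(board, color, direction, color2)
-- ===== SOURCE B (Python) =====
-- # Single-pass sweeps instead of getPositions pair loops: the sameColumn/sameRow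
-- # gates in A are redundant, so each direction reduces to "some a-cell strictly
-- # before some b-cell on a shared line", decided in one scan of the board.
--
-- def _row_sweep(line, a, b):
--     # some cell == a strictly before some cell == b in this line
--     seen = False
--     for cell in line:
--         if seen and cell == b:
--             return True
--         if cell == a:
--             seen = True
--     return False
--
-- def _col_sweep(board, a, b):
--     # some cell == a strictly above some cell == b in the same column
--     seen = set()
--     for row in board:
--         for j, cell in enumerate(row):
--             if cell == b and j in seen:
--                 return True
--         for j, cell in enumerate(row):
--             if cell == a:
--                 seen.add(j)
--     return False
--
-- def isTowards(board, color, direction, color2, isTrue=True):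
--     if not isTrue:
--         return not isTowards(board, color, direction, color2)
--     if direction == 'above':
--         return _col_sweep(board, color, color2)
--     if direction == 'under' or direction == 'below':
--         return _col_sweep(board, color2, color)
--     if direction == 'right':
--         return any(_row_sweep(row, color2, color) for row in board)
--     if direction == 'left':
--         return any(_row_sweep(row, color, color2) for row in board)
--     return False
-- ===== Notes on version B (the rewrite author's own statement) =====
-- stated objective: faster
-- what changed: A builds position lists and runs quadratic position-pair scans guarded by redundant sameColumn/sameRow calls (themselves quadratic); B answers the requested direction directly with a single linear sweep over the board (a seen-columns set for vertical directions, a seen-flag per row for horizontal ones).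
import Mathlib
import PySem

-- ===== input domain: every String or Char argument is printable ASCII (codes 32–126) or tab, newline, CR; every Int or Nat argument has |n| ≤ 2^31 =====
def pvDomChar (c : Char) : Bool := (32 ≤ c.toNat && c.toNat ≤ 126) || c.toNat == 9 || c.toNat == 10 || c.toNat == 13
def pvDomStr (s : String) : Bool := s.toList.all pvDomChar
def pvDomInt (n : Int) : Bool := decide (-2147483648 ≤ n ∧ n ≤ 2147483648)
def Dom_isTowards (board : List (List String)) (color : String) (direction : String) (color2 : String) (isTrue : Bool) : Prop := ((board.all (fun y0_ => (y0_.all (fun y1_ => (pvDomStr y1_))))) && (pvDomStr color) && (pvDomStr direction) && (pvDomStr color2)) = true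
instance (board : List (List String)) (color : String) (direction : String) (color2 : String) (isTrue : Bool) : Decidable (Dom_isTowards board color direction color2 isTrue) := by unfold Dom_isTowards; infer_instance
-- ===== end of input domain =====

-- B replaces A's quadratic position-pair scans (with their redundant sameColumn/sameRow gates)
-- by single-pass per-line sweeps; equivalence of the RETURN value is proved for all inputs.

-- ===== PORT A =====
def getPositions (board : List (List String)) (color : String) : List (Int × Int) :=
  (PySem.List.enumerate board).foldl (fun pos ir =>
    (PySem.List.enumerate ir.2).foldl (fun pos jc =>
      if jc.2 == color then pos ++ [(ir.1, jc.1)] else pos) pos) []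

-- body of sameRow for isTrue=True (the isTrue=False branch negates a recursive call with isTrue=True)
def sameRowT (board : List (List String)) (color1 color2 : String) : Bool :=
  let pos1 := getPositions board color1
  let pos2 := getPositions board color2
  if pos1 == pos2 then
    pos1.any (fun p1 => pos1.any (fun p2 => decide (1 < pos1.length) && p1.1 == p2.1))
  else
    pos1.any (fun p1 => pos2.any (fun p2 => p1.1 == p2.1))

def sameRow (board : List (List String)) (color1 color2 : String) (isTrue : Bool) : Bool :=
  if isTrue then sameRowT board color1 color2 else !(sameRowT board color1 color2)

def sameColumnT (board : List (List String)) (color1 color2 : String) : Bool :=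
  let pos1 := getPositions board color1
  let pos2 := getPositions board color2
  if pos1 == pos2 then
    pos1.any (fun p1 => pos1.any (fun p2 => decide (1 < pos1.length) && p1.2 == p2.2))
  else
    pos1.any (fun p1 => pos2.any (fun p2 => p1.2 == p2.2))

def sameColumn (board : List (List String)) (color1 color2 : String) (isTrue : Bool) : Bool :=
  if isTrue then sameColumnT board color1 color2 else !(sameColumnT board color1 color2)

-- body of isTowards for isTrue=True
def isTowardsT (board : List (List String)) (color direction color2 : String) : Bool :=
  let pos1 := getPositions board color
  let pos2 := getPositions board color2
  if sameColumn board color color2 true && direction == "above" then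
    pos1.any (fun p1 => pos2.any (fun p2 => decide (p1.1 < p2.1) && p1.2 == p2.2))
  else if sameColumn board color color2 true && (direction == "under" || direction == "below") then
    pos1.any (fun p1 => pos2.any (fun p2 => decide (p1.1 > p2.1) && p1.2 == p2.2))
  else if sameRow board color color2 true && direction == "right" then
    pos1.any (fun p1 => pos2.any (fun p2 => decide (p1.2 > p2.2) && p1.1 == p2.1))
  else if sameRow board color color2 true && direction == "left" then
    pos1.any (fun p1 => pos2.any (fun p2 => decide (p1.2 < p2.2) && p1.1 == p2.1))
  else false

def isTowards (board : List (List String)) (color : String) (direction : String) (color2 : String) (isTrue : Bool) : Bool :=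
  if isTrue then isTowardsT board color direction color2
  else !(isTowardsT board color direction color2)

-- ===== PORT B =====
-- some cell == a strictly before some cell == b in this line
def pvRowSweep (xs : List String) (a b : String) : Bool :=
  (xs.foldl (fun (st : Bool × Bool) cell =>
     if st.1 then st
     else if st.2 && cell == b then (true, st.2)
     else (st.1, st.2 || cell == a)) (false, false)).1

-- some cell == a strictly above some cell == b in the same column
def pvColSweep (board : List (List String)) (a b : String) : Bool :=
  (board.foldl (fun (st : Bool × PySem.Set Int) row =>
     if st.1 then st
     else if (PySem.List.enumerate row).any (fun jc => jc.2 == b && PySem.Set.contains st.2 jc.1) then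
       (true, st.2)
     else
       (st.1, (PySem.List.enumerate row).foldl
          (fun s jc => if jc.2 == a then PySem.Set.add s jc.1 else s) st.2))
   (false, PySem.Set.empty)).1

def isTowardsAltT (board : List (List String)) (color direction color2 : String) : Bool :=
  if direction == "above" then pvColSweep board color color2
  else if direction == "under" || direction == "below" then pvColSweep board color2 color
  else if direction == "right" then board.any (fun row => pvRowSweep row color2 color)
  else if direction == "left" then board.any (fun row => pvRowSweep row color color2)
  else false

def isTowards_alt (board : List (List String)) (color : String) (direction : String) (color2 : String) (isTrue : Bool) : Bool :=
  if !isTrue then !(isTowardsAltT board color direction color2)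
  else isTowardsAltT board color direction color2

-- ===== PRECONDITION & SPEC =====
def Spec_isTowards (board : List (List String)) (color : String) (direction : String) (color2 : String) (isTrue : Bool) (out : Bool) : Prop := out = isTowards_alt board color direction color2 isTrue
instance (board : List (List String)) (color : String) (direction : String) (color2 : String) (isTrue : Bool) (out : Bool) : Decidable (Spec_isTowards board color direction color2 isTrue out) := by unfold Spec_isTowards; infer_instance

-- ===== CLAIM (what is proved, stated in full; the proofs are below) =====
def Claim_equal_isTowards : Prop := ∀ (board : List (List String)) (color : String) (direction : String) (color2 : String) (isTrue : Bool), Dom_isTowards board color direction color2 isTrue → Spec_isTowards board color direction color2 isTrue (isTowards board color direction color2 isTrue)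

-- ===== LEMMAS AND PROOFS =====

def pvSB : List String → String → String → Bool
  | [], _, _ => false
  | c :: t, a, b => (c == a && t.any (· == b)) || pvSB t a b

theorem pvRowSweep_fold (a b : String) (xs : List String) (f s : Bool) :
    (xs.foldl (fun (st : Bool × Bool) cell =>
     if st.1 then st
     else if st.2 && cell == b then (true, st.2)
     else (st.1, st.2 || cell == a)) (f, s)).1
    = (f || (s && xs.any (· == b)) || pvSB xs a b) := by
  induction xs generalizing f s with
  | nil => simp [pvSB]
  | cons c t ih =>
    simp only [List.foldl_cons]
    cases f
    · by_cases hb : (s && (c == b)) = true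
      · simp only [hb, if_neg (by simp : ¬(false = true)), Bool.false_eq_true, if_false]
        rw [ih]
        simp_all [pvSB]
      · simp only [Bool.false_eq_true, if_false, hb, if_neg hb]
        rw [ih]
        cases s <;> cases hca : (c == a) <;> cases hcb : (c == b) <;> simp_all [pvSB] <;>
          simp [beq_eq_false_iff_ne.mpr hca, beq_eq_false_iff_ne.mpr hcb]
    · simp only [if_pos rfl]
      rw [ih]
      simp

theorem pvSB_iff (xs : List String) (a b : String) :
    pvSB xs a b = true ↔ ∃ j1 j2 : Nat, j1 < j2 ∧ xs[j1]? = some a ∧ xs[j2]? = some b := by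
  induction xs with
  | nil => simp [pvSB]
  | cons c t ih =>
    simp only [pvSB, Bool.or_eq_true, Bool.and_eq_true, beq_iff_eq, List.any_eq_true, ih]
    constructor
    · rintro (⟨rfl, x, hx, rfl⟩ | ⟨j1, j2, hlt, h1, h2⟩)
      · obtain ⟨k, hk⟩ := List.mem_iff_getElem?.1 hx
        exact ⟨0, k + 1, by omega, by simp, by simpa using hk⟩
      · exact ⟨j1 + 1, j2 + 1, by omega, by simpa, by simpa⟩
    · rintro ⟨j1, j2, hlt, h1, h2⟩
      obtain ⟨j2', rfl⟩ : ∃ j2', j2 = j2' + 1 := ⟨j2 - 1, by omega⟩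
      have h2' : t[j2']? = some b := by simpa using h2
      cases j1 with
      | zero => exact Or.inl ⟨by simpa using h1, b, List.mem_of_getElem? h2', rfl⟩
      | succ j1' => exact Or.inr ⟨j1', j2', by omega, by simpa using h1, h2'⟩

theorem pvRowSweep_iff (xs : List String) (a b : String) :
    pvRowSweep xs a b = true ↔ ∃ j1 j2 : Nat, j1 < j2 ∧ xs[j1]? = some a ∧ xs[j2]? = some b := by
  rw [← pvSB_iff]
  unfold pvRowSweep
  rw [pvRowSweep_fold]
  simp

def cellAt (board : List (List String)) (i j : Nat) : Option String :=
  (board[i]?).bind (fun r => r[j]?)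

def EV (board : List (List String)) (a b : String) : Prop :=
  ∃ i1 i2 j : Nat, i1 < i2 ∧ cellAt board i1 j = some a ∧ cellAt board i2 j = some b

def BelowB (rows : List (List String)) (b : String) (s : PySem.Set Int) : Prop :=
  ∃ i j : Nat, cellAt rows i j = some b ∧ ((j : Int)) ∈ s

theorem seen_fold_mem_gen (a : String) (l : List (Int × String)) (s : PySem.Set Int) (x : Int) :
    x ∈ l.foldl (fun s jc => if jc.2 == a then PySem.Set.add s jc.1 else s) s ↔
      x ∈ s ∨ ∃ jc ∈ l, jc.2 = a ∧ x = jc.1 := by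
  induction l generalizing s with
  | nil => simp
  | cons p t ih =>
    simp only [List.foldl_cons]
    by_cases hp : (p.2 == a) = true
    · rw [if_pos hp, ih, PySem.Set.mem_add]
      simp only [List.mem_cons]
      constructor
      · rintro ((h | rfl) | ⟨jc, hjc, hja, hx⟩)
        · exact Or.inl h
        · exact Or.inr ⟨p, Or.inl rfl, beq_iff_eq.1 hp, rfl⟩
        · exact Or.inr ⟨jc, Or.inr hjc, hja, hx⟩
      · rintro (h | ⟨jc, (rfl | hjc), hja, hx⟩)
        · exact Or.inl (Or.inl h)
        · exact Or.inl (Or.inr hx)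
        · exact Or.inr ⟨jc, hjc, hja, hx⟩
    · rw [if_neg hp, ih]
      simp only [List.mem_cons]
      constructor
      · rintro (h | ⟨jc, hjc, hja, hx⟩)
        · exact Or.inl h
        · exact Or.inr ⟨jc, Or.inr hjc, hja, hx⟩
      · rintro (h | ⟨jc, (rfl | hjc), hja, hx⟩)
        · exact Or.inl h
        · exact absurd (beq_iff_eq.2 hja) hp
        · exact Or.inr ⟨jc, hjc, hja, hx⟩

theorem seen_fold_mem (a : String) (row : List String) (s : PySem.Set Int) (x : Int) :
    x ∈ (PySem.List.enumerate row).foldl (fun s jc => if jc.2 == a then PySem.Set.add s jc.1 else s) s ↔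
      x ∈ s ∨ ∃ j : Nat, row[j]? = some a ∧ x = (j : Int) := by
  rw [seen_fold_mem_gen]
  simp only [PySem.List.mem_enumerate_iff]
  constructor
  · rintro (h | ⟨jc, ⟨k, hk, rfl⟩, ha, hx⟩)
    · exact Or.inl h
    · simp only [] at ha hx
      exact Or.inr ⟨k, by simp [List.getElem?_eq_getElem hk, ha], by simpa using hx⟩
  · rintro (h | ⟨j, hj, rfl⟩)
    · exact Or.inl h
    · have hjl : j < row.length := by
        by_contra hc
        simp [List.getElem?_eq_none (by omega : row.length ≤ j)] at hj
      have hj' : row[j] = a := by simpa [List.getElem?_eq_getElem hjl] using hj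
      exact Or.inr ⟨((j : Int), row[j]), ⟨j, hjl, by simp⟩, hj', by simp⟩

theorem hit_iff (b : String) (row : List String) (s : PySem.Set Int) :
    ((PySem.List.enumerate row).any (fun jc => jc.2 == b && PySem.Set.contains s jc.1) = true) ↔
      ∃ j : Nat, row[j]? = some b ∧ ((j : Int)) ∈ s := by
  simp only [List.any_eq_true, PySem.List.mem_enumerate_iff, Bool.and_eq_true, beq_iff_eq]
  constructor
  · rintro ⟨jc, ⟨k, hk, rfl⟩, hb, hs⟩
    simp only [] at hb hs
    exact ⟨k, by simp [List.getElem?_eq_getElem hk, hb], by simpa [PySem.Set.contains_iff] using hs⟩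
  · rintro ⟨j, hj, hs⟩
    have hjl : j < row.length := by
      by_contra hc
      simp [List.getElem?_eq_none (by omega : row.length ≤ j)] at hj
    have hj' : row[j] = b := by simpa [List.getElem?_eq_getElem hjl] using hj
    exact ⟨((j : Int), row[j]), ⟨j, hjl, by simp⟩, hj', by simpa [PySem.Set.contains_iff] using hs⟩

theorem cellAt_nil (i j : Nat) : cellAt ([] : List (List String)) i j = none := by
  simp [cellAt]

theorem cellAt_cons_succ (r : List String) (rows : List (List String)) (i j : Nat) :
    cellAt (r :: rows) (i + 1) j = cellAt rows i j := by simp [cellAt]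

theorem cellAt_cons_zero (r : List String) (rows : List (List String)) (j : Nat) :
    cellAt (r :: rows) 0 j = r[j]? := by simp [cellAt]

theorem EV_cons (row : List String) (rows : List (List String)) (a b : String) :
    EV (row :: rows) a b ↔
      (∃ j : Nat, row[j]? = some a ∧ ∃ i : Nat, cellAt rows i j = some b) ∨ EV rows a b := by
  constructor
  · rintro ⟨i1, i2, j, hlt, h1, h2⟩
    obtain ⟨i2', rfl⟩ : ∃ i2', i2 = i2' + 1 := ⟨i2 - 1, by omega⟩
    rw [cellAt_cons_succ] at h2
    cases i1 with
    | zero => exact Or.inl ⟨j, by rwa [cellAt_cons_zero] at h1, i2', h2⟩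
    | succ i1' => exact Or.inr ⟨i1', i2', j, by omega, by rwa [cellAt_cons_succ] at h1, h2⟩
  · rintro (⟨j, h1, i, h2⟩ | ⟨i1, i2, j, hlt, h1, h2⟩)
    · exact ⟨0, i + 1, j, by omega, by rwa [cellAt_cons_zero], by rwa [cellAt_cons_succ]⟩
    · exact ⟨i1 + 1, i2 + 1, j, by omega, by rwa [cellAt_cons_succ], by rwa [cellAt_cons_succ]⟩

theorem BelowB_cons (row : List String) (rows : List (List String)) (b : String) (s : PySem.Set Int) :
    BelowB (row :: rows) b s ↔
      (∃ j : Nat, row[j]? = some b ∧ ((j : Int)) ∈ s) ∨ BelowB rows b s := by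
  constructor
  · rintro ⟨i, j, h1, h2⟩
    cases i with
    | zero => exact Or.inl ⟨j, by rwa [cellAt_cons_zero] at h1, h2⟩
    | succ i' => exact Or.inr ⟨i', j, by rwa [cellAt_cons_succ] at h1, h2⟩
  · rintro (⟨j, h1, h2⟩ | ⟨i, j, h1, h2⟩)
    · exact ⟨0, j, by rwa [cellAt_cons_zero], h2⟩
    · exact ⟨i + 1, j, by rwa [cellAt_cons_succ], h2⟩

theorem colSweep_fold (a b : String) (rows : List (List String)) (f : Bool) (s : PySem.Set Int) :
    ((rows.foldl (fun (st : Bool × PySem.Set Int) row =>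
     if st.1 then st
     else if (PySem.List.enumerate row).any (fun jc => jc.2 == b && PySem.Set.contains st.2 jc.1) then
       (true, st.2)
     else
       (st.1, (PySem.List.enumerate row).foldl
          (fun s jc => if jc.2 == a then PySem.Set.add s jc.1 else s) st.2))
   (f, s)).1 = true) ↔ f = true ∨ BelowB rows b s ∨ EV rows a b := by
  induction rows generalizing f s with
  | nil => simp [BelowB, EV, cellAt_nil]
  | cons row rows ih =>
    simp only [List.foldl_cons]
    cases f
    · by_cases hhit : ((PySem.List.enumerate row).any
          (fun jc => jc.2 == b && PySem.Set.contains s jc.1)) = true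
      · simp only [Bool.false_eq_true, if_false, hhit, if_true]
        rw [ih]
        have hb : BelowB (row :: rows) b s := by
          obtain ⟨j, hj, hs⟩ := (hit_iff b row s).1 hhit
          exact ⟨0, j, by rwa [cellAt_cons_zero], hs⟩
        simp [hb]
      · simp only [Bool.false_eq_true, if_false, hhit]
        rw [ih]
        rw [BelowB_cons, EV_cons]
        have hnohit : ¬ ∃ j : Nat, row[j]? = some b ∧ ((j : Int)) ∈ s := by
          rw [← hit_iff b row s]; exact hhit
        have hs' : BelowB rows b ((PySem.List.enumerate row).foldl
            (fun s jc => if jc.2 == a then PySem.Set.add s jc.1 else s) s) ↔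
            BelowB rows b s ∨ (∃ j : Nat, row[j]? = some a ∧ ∃ i : Nat, cellAt rows i j = some b) := by
          constructor
          · rintro ⟨i, j, h1, h2⟩
            rcases (seen_fold_mem a row s (j : Int)).1 h2 with h | ⟨j', hj', hcast⟩
            · exact Or.inl ⟨i, j, h1, h⟩
            · obtain rfl : j = j' := by exact_mod_cast hcast
              exact Or.inr ⟨j, hj', i, h1⟩
          · rintro (⟨i, j, h1, h2⟩ | ⟨j, h1, i, h2⟩)
            · exact ⟨i, j, h1, (seen_fold_mem a row s _).2 (Or.inl h2)⟩
            · exact ⟨i, j, h2, (seen_fold_mem a row s _).2 (Or.inr ⟨j, h1, rfl⟩)⟩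
        rw [hs']
        simp only [Bool.false_eq_true, false_or, hnohit, false_or, or_assoc]
    · simp only [if_pos rfl]
      rw [ih]
      simp

theorem pvColSweep_iff (board : List (List String)) (a b : String) :
    pvColSweep board a b = true ↔ EV board a b := by
  unfold pvColSweep
  rw [colSweep_fold]
  have hemp : ¬ BelowB board b ([] : PySem.Set Int) := by
    rintro ⟨i, j, _, h⟩
    simp at h
  simp only [Bool.false_eq_true, false_or, PySem.Set.empty] at *
  simp [hemp]

theorem mem_getPositions (board : List (List String)) (c : String) (p : Int × Int) :
    p ∈ getPositions board c ↔ ∃ i j : Nat, cellAt board i j = some c ∧ p = ((i : Int), (j : Int)) := by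
  unfold getPositions
  simp only [PySem.List.foldl_append_if, PySem.List.foldl_append_eq_flatMap]
  simp only [List.nil_append, List.mem_flatMap, List.mem_map, List.mem_filter,
    PySem.List.mem_enumerate_iff, cellAt]
  constructor
  · rintro ⟨ir, ⟨i, hi, rfl⟩, jc, ⟨⟨j, hj, rfl⟩, hc⟩, rfl⟩
    exact ⟨i, j, by simp_all [beq_iff_eq], by simp⟩
  · rintro ⟨i, j, hc, rfl⟩
    have hi : i < board.length := by
      by_contra h
      simp [List.getElem?_eq_none (by omega : board.length ≤ i)] at hc
    have hj : j < board[i].length := by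
      by_contra h
      simp [List.getElem?_eq_getElem hi, List.getElem?_eq_none (by omega : board[i].length ≤ j)] at hc
    refine ⟨(↑i, board[i]), ⟨i, hi, by simp⟩, (↑j, board[i][j]), ⟨⟨j, hj, by simp⟩, ?_⟩, by simp_all⟩
    simp_all [List.getElem?_eq_getElem hi, beq_iff_eq]

theorem one_lt_length_of_two_mem {α : Type} {l : List α} {x y : α}
    (hx : x ∈ l) (hy : y ∈ l) (hne : x ≠ y) : 1 < l.length := by
  match l with
  | [] => simp at hx
  | [a] => simp at hx hy; exact absurd (hx.trans hy.symm) hne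
  | a :: b :: t => simp

theorem gateCol (board : List (List String)) (c1 c2 : String)
    (h : ∃ i1 i2 j : Nat, i1 ≠ i2 ∧ cellAt board i1 j = some c1 ∧ cellAt board i2 j = some c2) :
    sameColumnT board c1 c2 = true := by
  obtain ⟨i1, i2, j, hne, h1, h2⟩ := h
  have hp : ((i1 : Int), (j : Int)) ∈ getPositions board c1 :=
    (mem_getPositions board c1 _).2 ⟨i1, j, h1, rfl⟩
  have hq : ((i2 : Int), (j : Int)) ∈ getPositions board c2 :=
    (mem_getPositions board c2 _).2 ⟨i2, j, h2, rfl⟩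
  unfold sameColumnT
  by_cases he : getPositions board c1 = getPositions board c2
  · rw [if_pos (by simpa using he)]
    have hq' : ((i2 : Int), (j : Int)) ∈ getPositions board c1 := he ▸ hq
    have hlen : 1 < (getPositions board c1).length :=
      one_lt_length_of_two_mem hp hq' (by simp; omega)
    simp only [List.any_eq_true]
    exact ⟨_, hp, _, hp, by simp [hlen]⟩
  · rw [if_neg (by simpa using he)]
    simp only [List.any_eq_true]
    exact ⟨_, hp, _, hq, by simp⟩

theorem gateRow (board : List (List String)) (c1 c2 : String)
    (h : ∃ i j1 j2 : Nat, j1 ≠ j2 ∧ cellAt board i j1 = some c1 ∧ cellAt board i j2 = some c2) :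
    sameRowT board c1 c2 = true := by
  obtain ⟨i, j1, j2, hne, h1, h2⟩ := h
  have hp : ((i : Int), (j1 : Int)) ∈ getPositions board c1 :=
    (mem_getPositions board c1 _).2 ⟨i, j1, h1, rfl⟩
  have hq : ((i : Int), (j2 : Int)) ∈ getPositions board c2 :=
    (mem_getPositions board c2 _).2 ⟨i, j2, h2, rfl⟩
  unfold sameRowT
  by_cases he : getPositions board c1 = getPositions board c2
  · rw [if_pos (by simpa using he)]
    have hq' : ((i : Int), (j2 : Int)) ∈ getPositions board c1 := he ▸ hq
    have hlen : 1 < (getPositions board c1).length :=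
      one_lt_length_of_two_mem hp hq' (by simp; omega)
    simp only [List.any_eq_true]
    exact ⟨_, hp, _, hp, by simp [hlen]⟩
  · rw [if_neg (by simpa using he)]
    simp only [List.any_eq_true]
    exact ⟨_, hp, _, hq, by simp⟩

def EH (board : List (List String)) (a b : String) : Prop :=
  ∃ i j1 j2 : Nat, j1 < j2 ∧ cellAt board i j1 = some a ∧ cellAt board i j2 = some b

theorem anyRowSweep_iff (board : List (List String)) (a b : String) :
    (board.any (fun row => pvRowSweep row a b) = true) ↔ EH board a b := by
  simp only [List.any_eq_true, pvRowSweep_iff]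
  constructor
  · rintro ⟨row, hrow, j1, j2, hlt, h1, h2⟩
    obtain ⟨i, hi⟩ := List.mem_iff_getElem?.1 hrow
    exact ⟨i, j1, j2, hlt, by simp [cellAt, hi, h1], by simp [cellAt, hi, h2]⟩
  · rintro ⟨i, j1, j2, hlt, h1, h2⟩
    simp only [cellAt] at h1 h2
    cases hrow : board[i]? with
    | none => simp [hrow] at h1
    | some row =>
      rw [hrow] at h1 h2
      exact ⟨row, List.mem_of_getElem? hrow, j1, j2, hlt, h1, h2⟩

theorem anyAbove_iff (board : List (List String)) (a b : String) :
    ((getPositions board a).any (fun p1 => (getPositions board b).any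
       (fun p2 => decide (p1.1 < p2.1) && p1.2 == p2.2)) = true) ↔ EV board a b := by
  simp only [List.any_eq_true, Bool.and_eq_true, decide_eq_true_eq, beq_iff_eq,
    mem_getPositions]
  constructor
  · rintro ⟨p1, ⟨i1, j1, h1, rfl⟩, p2, ⟨i2, j2, h2, rfl⟩, hlt, hcol⟩
    simp only [] at hlt hcol
    obtain rfl : j1 = j2 := by exact_mod_cast hcol
    exact ⟨i1, i2, j1, by exact_mod_cast hlt, h1, h2⟩
  · rintro ⟨i1, i2, j, hlt, h1, h2⟩
    exact ⟨_, ⟨i1, j, h1, rfl⟩, _, ⟨i2, j, h2, rfl⟩, by simp only []; exact_mod_cast hlt, rfl⟩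

theorem anyUnder_iff (board : List (List String)) (a b : String) :
    ((getPositions board a).any (fun p1 => (getPositions board b).any
       (fun p2 => decide (p1.1 > p2.1) && p1.2 == p2.2)) = true) ↔ EV board b a := by
  simp only [List.any_eq_true, Bool.and_eq_true, decide_eq_true_eq, beq_iff_eq,
    mem_getPositions]
  constructor
  · rintro ⟨p1, ⟨i1, j1, h1, rfl⟩, p2, ⟨i2, j2, h2, rfl⟩, hlt, hcol⟩
    simp only [] at hlt hcol
    obtain rfl : j1 = j2 := by exact_mod_cast hcol
    exact ⟨i2, i1, j1, by exact_mod_cast hlt, h2, h1⟩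
  · rintro ⟨i2, i1, j, hlt, h2, h1⟩
    exact ⟨_, ⟨i1, j, h1, rfl⟩, _, ⟨i2, j, h2, rfl⟩, by simp only []; exact_mod_cast hlt, rfl⟩

theorem anyRight_iff (board : List (List String)) (a b : String) :
    ((getPositions board a).any (fun p1 => (getPositions board b).any
       (fun p2 => decide (p1.2 > p2.2) && p1.1 == p2.1)) = true) ↔ EH board b a := by
  simp only [List.any_eq_true, Bool.and_eq_true, decide_eq_true_eq, beq_iff_eq,
    mem_getPositions]
  constructor
  · rintro ⟨p1, ⟨i1, j1, h1, rfl⟩, p2, ⟨i2, j2, h2, rfl⟩, hlt, hrow⟩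
    simp only [] at hlt hrow
    obtain rfl : i1 = i2 := by exact_mod_cast hrow
    exact ⟨i1, j2, j1, by exact_mod_cast hlt, h2, h1⟩
  · rintro ⟨i, j2, j1, hlt, h2, h1⟩
    exact ⟨_, ⟨i, j1, h1, rfl⟩, _, ⟨i, j2, h2, rfl⟩, by simp only []; exact_mod_cast hlt, rfl⟩

theorem anyLeft_iff (board : List (List String)) (a b : String) :
    ((getPositions board a).any (fun p1 => (getPositions board b).any
       (fun p2 => decide (p1.2 < p2.2) && p1.1 == p2.1)) = true) ↔ EH board a b := by
  simp only [List.any_eq_true, Bool.and_eq_true, decide_eq_true_eq, beq_iff_eq,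
    mem_getPositions]
  constructor
  · rintro ⟨p1, ⟨i1, j1, h1, rfl⟩, p2, ⟨i2, j2, h2, rfl⟩, hlt, hrow⟩
    simp only [] at hlt hrow
    obtain rfl : i1 = i2 := by exact_mod_cast hrow
    exact ⟨i1, j1, j2, by exact_mod_cast hlt, h1, h2⟩
  · rintro ⟨i, j1, j2, hlt, h1, h2⟩
    exact ⟨_, ⟨i, j1, h1, rfl⟩, _, ⟨i, j2, h2, rfl⟩, by simp only []; exact_mod_cast hlt, rfl⟩

theorem core_eq (board : List (List String)) (color direction color2 : String) :
    isTowardsT board color direction color2 = isTowardsAltT board color direction color2 := by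
  unfold isTowardsT isTowardsAltT sameColumn sameRow
  by_cases h1 : direction = "above"
  · subst h1
    by_cases hEV : EV board color color2
    · have hg : sameColumnT board color color2 = true := by
        refine gateCol board color color2 ?_
        obtain ⟨i1, i2, j, hlt, ha, hb⟩ := hEV
        exact ⟨i1, i2, j, by omega, ha, hb⟩
      have ha := (anyAbove_iff board color color2).2 hEV
      have hc := (pvColSweep_iff board color color2).2 hEV
      simp [hg, ha, hc]
    · have ha : ((getPositions board color).any (fun p1 => (getPositions board color2).any
          (fun p2 => decide (p1.1 < p2.1) && p1.2 == p2.2))) = false :=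
        Bool.eq_false_iff.mpr (fun h => hEV ((anyAbove_iff board color color2).1 h))
      have hc : pvColSweep board color color2 = false :=
        Bool.eq_false_iff.mpr (fun h => hEV ((pvColSweep_iff board color color2).1 h))
      simp [ha, hc]
  by_cases h2 : direction = "under" ∨ direction = "below"
  · have hb1 : (direction == "above") = false := by simp [h1]
    by_cases hEV : EV board color2 color
    · have hg : sameColumnT board color color2 = true := by
        refine gateCol board color color2 ?_
        obtain ⟨i1, i2, j, hlt, ha, hb⟩ := hEV
        exact ⟨i2, i1, j, by omega, hb, ha⟩
      have ha := (anyUnder_iff board color color2).2 hEV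
      have hc := (pvColSweep_iff board color2 color).2 hEV
      rcases h2 with rfl | rfl <;> simp [hg, ha, hc, hb1]
    · have ha : ((getPositions board color).any (fun p1 => (getPositions board color2).any
          (fun p2 => decide (p1.1 > p2.1) && p1.2 == p2.2))) = false :=
        Bool.eq_false_iff.mpr (fun h => hEV ((anyUnder_iff board color color2).1 h))
      have hc : pvColSweep board color2 color = false :=
        Bool.eq_false_iff.mpr (fun h => hEV ((pvColSweep_iff board color2 color).1 h))
      rcases h2 with rfl | rfl <;> simp [ha, hc, hb1]
  by_cases h3 : direction = "right"
  · subst h3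
    by_cases hEH : EH board color2 color
    · have hg : sameRowT board color color2 = true := by
        refine gateRow board color color2 ?_
        obtain ⟨i, j1, j2, hlt, ha, hb⟩ := hEH
        exact ⟨i, j2, j1, by omega, hb, ha⟩
      have ha := (anyRight_iff board color color2).2 hEH
      have hc := (anyRowSweep_iff board color2 color).2 hEH
      simp [hg, ha, hc]
    · have ha : ((getPositions board color).any (fun p1 => (getPositions board color2).any
          (fun p2 => decide (p1.2 > p2.2) && p1.1 == p2.1))) = false :=
        Bool.eq_false_iff.mpr (fun h => hEH ((anyRight_iff board color color2).1 h))
      have hc : (board.any (fun row => pvRowSweep row color2 color)) = false :=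
        Bool.eq_false_iff.mpr (fun h => hEH ((anyRowSweep_iff board color2 color).1 h))
      simp [ha, hc]
  by_cases h4 : direction = "left"
  · subst h4
    by_cases hEH : EH board color color2
    · have hg : sameRowT board color color2 = true := by
        refine gateRow board color color2 ?_
        obtain ⟨i, j1, j2, hlt, ha, hb⟩ := hEH
        exact ⟨i, j1, j2, by omega, ha, hb⟩
      have ha := (anyLeft_iff board color color2).2 hEH
      have hc := (anyRowSweep_iff board color color2).2 hEH
      simp [hg, ha, hc]
    · have ha : ((getPositions board color).any (fun p1 => (getPositions board color2).any
          (fun p2 => decide (p1.2 < p2.2) && p1.1 == p2.1))) = false :=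
        Bool.eq_false_iff.mpr (fun h => hEH ((anyLeft_iff board color color2).1 h))
      have hc : (board.any (fun row => pvRowSweep row color color2)) = false :=
        Bool.eq_false_iff.mpr (fun h => hEH ((anyRowSweep_iff board color color2).1 h))
      simp [ha, hc]
  · push_neg at h2
    simp [h1, h2.1, h2.2, h3, h4]

-- ===== VERDICT (by name: the statement is the Claim_ definition above) =====
theorem isTowards_spec : Claim_equal_isTowards := by
  intro board color direction color2 isTrue _
  unfold Spec_isTowards isTowards isTowards_alt
  cases isTrue <;> simp [core_eq]
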